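-- pv_equiv track=rewrite | github.com/ChangyaoZhou/Leetcode | 一些机考/microsoft2.py | solution
-- ===== SOURCE A (Python) =====
-- def if_m_align(nums, M):
--     for i in range(len(nums)):
--         for j in range(i + 1, len(nums)):
--             if (nums[i] - nums[j]) % M != 0:
--                 return False
--     return True
--
-- def solution(A, M):
--     # write your code in Python (Python 3.6)
--
--     if M == 1:
--         return len(if_m_align)
--     result = []
--     path = []
--     A.sort()
--
--     def backtracking(A, start_idx):
--         if start_idx == len(A):
--             return
--
--         for i in range(start_idx, len(A)):
--             if i > start_idx and A[i] == A[i - 1]: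
--                 continue
--             path.append(A[i])
--             result.append(path[:])
--             backtracking(A, i + 1)
--             path.pop()
--
--     backtracking(A, 0)
--     max_len = len(A)
--     for max_len in range(len(A), 2, -1):
--         for res in result:
--             if len(res) == max_len and if_m_align(res, M):
--                 return max_len
--     return 1
-- ===== SOURCE B (Python) =====
-- def solution(A, M):
--     # Count elements per residue class mod M; the largest pairwise-congruent
--     # subset is the biggest residue class; A only reports sizes >= 3, else 1.
--     counts = {}
--     for x in A:
--         r = x % M
--         counts[r] = counts.get(r, 0) + 1
--     best = max(counts.values()) if counts else 0
--     return best if best >= 3 else 1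
-- ===== Notes on version B (the rewrite author's own statement) =====
-- stated objective: faster
-- what changed: replaces the exponential subset enumeration (backtracking over all distinct subsets, then scanning them by length with a quadratic pairwise-congruence check) by a single pass counting elements per residue class mod M and returning the largest class size if it is at least 3, else 1
-- outside the precondition, e.g. on solution([1, 2], 0): A returns 1, B raises ZeroDivisionError
import Mathlib
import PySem

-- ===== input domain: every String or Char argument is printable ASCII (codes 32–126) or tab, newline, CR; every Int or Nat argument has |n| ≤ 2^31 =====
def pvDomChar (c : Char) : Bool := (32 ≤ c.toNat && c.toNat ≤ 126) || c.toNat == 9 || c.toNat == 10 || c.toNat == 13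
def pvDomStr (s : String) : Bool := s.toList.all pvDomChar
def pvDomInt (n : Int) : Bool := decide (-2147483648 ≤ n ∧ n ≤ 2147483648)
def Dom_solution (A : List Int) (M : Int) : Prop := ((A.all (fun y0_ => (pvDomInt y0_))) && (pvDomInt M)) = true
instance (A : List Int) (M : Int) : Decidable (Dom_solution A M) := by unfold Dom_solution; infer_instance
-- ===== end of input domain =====

-- B replaces A's exponential subset backtracking by one counting pass over residue classes mod M.
-- Note: A sorts its list argument in place; the equivalence proved here is about the return value only.


-- ===== PORT A =====

-- if_m_align: nested index loops with early return False = all-pairs check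
def ifMAlign (nums : List Int) (M : Int) : Bool :=
  (PySem.List.pyRange 0 (nums.length : Int) 1).all (fun i =>
    (PySem.List.pyRange (i + 1) (nums.length : Int) 1).all (fun j =>
      PySem.Int.mod (PySem.List.pyGetD nums i 0 - PySem.List.pyGetD nums j 0) M == 0))

-- backtracking(A, start_idx): the for-loop over i in range(start_idx, len(A)) with the mutable
-- path/result threaded through; btA As start i path result is the loop at iteration i
-- (the 'if start_idx == len(A): return' guard is the i < len(A) test of the empty loop).
def btA (As : List Int) (start i : Nat) (path : List Int) (result : List (List Int)) :
    List (List Int) :=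
  if _h : i < As.length then
    if start < i ∧ As.getD i 0 = As.getD (i - 1) 0 then
      btA As start (i + 1) path result                    -- continue
    else
      let path' := path ++ [As.getD i 0]                  -- path.append(A[i])
      -- result.append(path[:]); backtracking(A, i+1); path.pop()
      btA As start (i + 1) path (btA As (i + 1) (i + 1) path' (result ++ [path']))
  else result
termination_by As.length - i
decreasing_by all_goals omega

-- the final double loop: for max_len in range(len(A), 2, -1): for res in result: if …: return max_len
def scanA (result : List (List Int)) (M : Int) (lens : List Int) : Int :=
  match lens with
  | [] => 1
  | L :: rest =>
    match result.find? (fun res => ((res.length : Int) == L) && ifMAlign res M) with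
    | some _ => L
    | none => scanA result M rest

def solution (A : List Int) (M : Int) : Int :=
  if M = 1 then 0   -- Python: 'return len(if_m_align)' raises TypeError here; excluded by Pre_solution
  else
    let As := PySem.List.sorted A (fun x => x) false      -- A.sort()
    let result := btA As 0 0 [] []                        -- backtracking(A, 0)
    scanA result M (PySem.List.pyRange (As.length : Int) 2 (-1))

-- ===== PORT B =====
def solution_alt (A : List Int) (M : Int) : Int :=
  let counts := A.foldl
    (fun d x => d.insert (PySem.Int.mod x M) (d.getD (PySem.Int.mod x M) 0 + 1))
    PySem.Dict.empty
  let best : Int := if counts.size = 0 then 0 else (PySem.List.max? counts.values (fun v => v)).getD 0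
  if 3 ≤ best then best else 1

-- ===== PRECONDITION & SPEC =====
-- Pre_ excludes M = 1, where A raises TypeError (len of a function object), and M = 0, where A raises
-- ZeroDivisionError for lists of length ≥ 3 and B raises ZeroDivisionError for any nonempty list
-- (A's returning 1 on M = 0 with fewer than 3 elements is an accident of its loops never touching M).
def Pre_solution (A : List Int) (M : Int) : Prop := M ≠ 1 ∧ M ≠ 0
instance (A : List Int) (M : Int) : Decidable (Pre_solution A M) := by
  unfold Pre_solution; infer_instance
def pvWitness_solution : List Int × Int := ([4, 5, 6, 8], 2)

def Spec_solution (A : List Int) (M : Int) (out : Int) : Prop := out = solution_alt A M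
instance (A : List Int) (M : Int) (out : Int) : Decidable (Spec_solution A M out) := by
  unfold Spec_solution; infer_instance

-- ===== CLAIM (what is proved, stated in full; the proofs are below) =====
def Claim_equal_solution : Prop :=
  ∀ (A : List Int) (M : Int), Dom_solution A M → Pre_solution A M →
    Spec_solution A M (solution A M)
-- ===== LEMMAS AND PROOFS =====

-- the residues of A's elements, and B's "best" value (the largest residue-class size)
def residsOf (A : List Int) (M : Int) : List Int := A.map (fun x => PySem.Int.mod x M)
def bestOf (A : List Int) (M : Int) : Int :=
  if residsOf A M = [] then 0
  else (PySem.List.max? ((PySem.Set.ofList (residsOf A M)).map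
         (fun k => ((residsOf A M).count k : Int))) (fun v => v)).getD 0

-- structural (suffix-with-previous-element) reformulation of the backtracking loop, proof-side only
def gen (prev : Option Int) (L : List Int) (path : List Int) : List (List Int) :=
  match L with
  | [] => []
  | x :: xs =>
    if prev = some x then gen (some x) xs path
    else (path ++ [x]) :: (gen none xs (path ++ [x]) ++ gen (some x) xs path)

theorem mod_eq_mod_iff_dvd_sub (M x y : Int) (hM : M ≠ 0) :
    PySem.Int.mod x M = PySem.Int.mod y M ↔ M ∣ (x - y) := by
  constructor
  · intro h
    have hx := PySem.Int.floordiv_mul_add_mod x M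
    have hy := PySem.Int.floordiv_mul_add_mod y M
    have : x - y = (PySem.Int.floordiv x M - PySem.Int.floordiv y M) * M := by
      rw [sub_mul]; linarith
    exact ⟨_, by rw [this, mul_comm]⟩
  · intro h
    have hx := PySem.Int.floordiv_mul_add_mod x M
    have hy := PySem.Int.floordiv_mul_add_mod y M
    have hd : M ∣ (PySem.Int.mod x M - PySem.Int.mod y M) := by
      have : PySem.Int.mod x M - PySem.Int.mod y M =
        (x - y) - (PySem.Int.floordiv x M - PySem.Int.floordiv y M) * M := by
        rw [sub_mul]; linarith
      rw [this]
      exact dvd_sub h ⟨_, mul_comm _ _⟩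
    have hb : |PySem.Int.mod x M - PySem.Int.mod y M| < |M| := by
      rcases lt_or_gt_of_ne hM with hMn | hMp
      · have b1 := PySem.Int.mod_neg_bounds x hMn
        have b2 := PySem.Int.mod_neg_bounds y hMn
        rw [abs_lt]; rw [abs_of_neg hMn]; omega
      · have b1 := PySem.Int.mod_nonneg x hMp
        have b2 := PySem.Int.mod_nonneg y hMp
        have c1 := PySem.Int.mod_lt x hMp
        have c2 := PySem.Int.mod_lt y hMp
        rw [abs_lt]; rw [abs_of_pos hMp]; omega
    have := Int.eq_zero_of_abs_lt_dvd ((abs_dvd _ _).mpr hd) hb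
    omega

theorem ifMAlign_iff (s : List Int) (M : Int) :
    ifMAlign s M = true ↔
      ∀ (i j : Nat), (hij : i < j) → (hj : j < s.length) →
        PySem.Int.mod (s[i]'(by omega) - s[j]) M = 0 := by
  unfold ifMAlign
  simp only [List.all_eq_true, PySem.List.mem_pyRange_one, beq_iff_eq]
  constructor
  · intro h i j hij hj
    have := h (i : Int) ⟨by positivity, by exact_mod_cast (by omega : (i:Int) < s.length)⟩
      (j : Int) ⟨by exact_mod_cast (by omega : (i:Int)+1 ≤ j), by exact_mod_cast hj⟩
    rw [PySem.List.pyGetD_eq_getElem s 0 (by positivity) (by exact_mod_cast (by omega : i < s.length)),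
        PySem.List.pyGetD_eq_getElem s 0 (by positivity) (by exact_mod_cast hj)] at this
    simpa using this
  · intro h i hi j hj
    rw [PySem.List.pyGetD_eq_getElem s 0 hi.1 hi.2,
        PySem.List.pyGetD_eq_getElem s 0 (by omega) hj.2]
    exact h i.toNat j.toNat (by omega) (by omega)

theorem btA_eq_gen (As : List Int) :
    ∀ (n : Nat) (start i : Nat) (path : List Int) (result : List (List Int)),
      As.length - i ≤ n → start ≤ i →
      btA As start i path result =
        result ++ gen (if start < i ∧ 0 < i then some (As.getD (i - 1) 0) else none)
          (As.drop i) path := by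
  intro n
  induction n with
  | zero =>
    intro start i path result hn _
    rw [btA]
    have : ¬ i < As.length := by omega
    rw [dif_neg this, List.drop_of_length_le (by omega)]
    simp [gen]
  | succ n ih =>
    intro start i path result hn hsi
    by_cases h : i < As.length
    · have hdrop : As.drop i = As[i] :: As.drop (i + 1) :=
        List.drop_eq_getElem_cons h
      have hget : As.getD i 0 = As[i] := List.getD_eq_getElem As 0 h
      rw [btA]
      simp only [dif_pos h]
      by_cases hskip : start < i ∧ As.getD i 0 = As.getD (i - 1) 0
      · -- skip branch
        rw [if_pos hskip]
        rw [ih start (i + 1) path result (by omega) (by omega)]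
        rw [hdrop, gen]
        have hprev : (if start < i ∧ 0 < i then some (As.getD (i - 1) 0) else none)
            = some As[i] := by
          rw [if_pos ⟨hskip.1, by omega⟩, ← hskip.2, hget]
        rw [hprev]
        rw [if_pos ⟨by omega, by omega⟩]
        simp only [Nat.add_sub_cancel]
        rw [hget]
        simp
      · -- take branch
        rw [if_neg hskip]
        have hprev : ¬ ((if start < i ∧ 0 < i then some (As.getD (i - 1) 0) else none)
            = some As[i]) := by
          split_ifs with hc
          · intro hcontra
            exact hskip ⟨hc.1, by rw [hget]; exact (Option.some_inj.mp hcontra).symm⟩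
          · simp
        rw [ih (i+1) (i+1) (path ++ [As.getD i 0]) (result ++ [path ++ [As.getD i 0]])
              (by omega) (by omega)]
        rw [ih start (i+1) path _ (by omega) (by omega)]
        rw [hdrop, gen, if_neg hprev]
        rw [if_neg (by omega : ¬ (i + 1 < i + 1 ∧ 0 < i + 1))]
        rw [if_pos ⟨by omega, by omega⟩]
        simp only [Nat.add_sub_cancel]
        rw [hget]
        simp
    · rw [btA, dif_neg h, List.drop_of_length_le (by omega)]
      simp [gen]

theorem gen_sound (L : List Int) :
    ∀ (prev : Option Int) (path res : List Int),
      res ∈ gen prev L path → ∃ s, s.Sublist L ∧ s ≠ [] ∧ res = path ++ s := by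
  induction L with
  | nil => intro prev path res h; simp [gen] at h
  | cons x xs ih =>
    intro prev path res h
    rw [gen] at h
    split_ifs at h with hp
    · obtain ⟨s, hs, hne, hre⟩ := ih _ _ _ h
      exact ⟨s, hs.cons x, hne, hre⟩
    · rcases List.mem_cons.mp h with hre | h2
      · exact ⟨[x], by simp, by simp, hre⟩
      · rcases List.mem_append.mp h2 with h3 | h3
        · obtain ⟨s, hs, hne, hre⟩ := ih _ _ _ h3
          exact ⟨x :: s, hs.cons₂ x, by simp, by simpa using hre⟩
        · obtain ⟨s, hs, hne, hre⟩ := ih _ _ _ h3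
          exact ⟨s, hs.cons x, hne, hre⟩

theorem gen_complete (M r : Int) (L : List Int) :
    ∀ (prev : Option Int) (path : List Int),
      L.filter (fun y => PySem.Int.mod y M == r) ≠ [] →
      (∀ v, prev = some v → PySem.Int.mod v M ≠ r) →
      path ++ L.filter (fun y => PySem.Int.mod y M == r) ∈ gen prev L path := by
  induction L with
  | nil => intro prev path h _; simp at h
  | cons x xs ih =>
    intro prev path h hprev
    by_cases hx : PySem.Int.mod x M = r
    · -- x is in the class; the dedup test cannot fire, since prev is never a class element
      have hf : (x :: xs).filter (fun y => PySem.Int.mod y M == r) =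
          x :: xs.filter (fun y => PySem.Int.mod y M == r) := by
        simp [hx]
      have hpx : ¬ prev = some x := by
        intro hc; exact hprev x hc hx
      rw [gen, if_neg hpx, hf]
      by_cases hrest : xs.filter (fun y => PySem.Int.mod y M == r) = []
      · rw [hrest]; simp
      · have := ih none (path ++ [x]) hrest (by simp)
        refine List.mem_cons.mpr (Or.inr (List.mem_append.mpr (Or.inl ?_)))
        simpa using this
    · -- x not in the class: skip it (in either branch the tail call keeps the goal)
      have hf : (x :: xs).filter (fun y => PySem.Int.mod y M == r) =
          xs.filter (fun y => PySem.Int.mod y M == r) := by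
        simp [hx]
      rw [hf] at h ⊢
      have hxs := ih (some x) path h (by intro v hv; injection hv with hv; rw [← hv]; exact hx)
      rw [gen]
      split_ifs with hp
      · exact hxs
      · exact List.mem_cons.mpr (Or.inr (List.mem_append.mpr (Or.inr hxs)))

theorem ofList_eq_nil_iff (R : List Int) : PySem.Set.ofList R = [] ↔ R = [] := by
  constructor
  · intro h
    by_contra hne
    rcases List.exists_mem_of_ne_nil R hne with ⟨x, hx⟩
    have := (PySem.Set.mem_ofList R x).mpr hx
    rw [h] at this; simp at this
  · intro h; subst h; rfl

theorem alt_eq_best (A : List Int) (M : Int) :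
    solution_alt A M = if 3 ≤ bestOf A M then bestOf A M else 1 := by
  unfold solution_alt
  have hc : A.foldl
      (fun d x => d.insert (PySem.Int.mod x M) (d.getD (PySem.Int.mod x M) 0 + 1))
      PySem.Dict.empty = PySem.Dict.counter (residsOf A M) := by
    rw [← PySem.Dict.foldl_insert_getD_add_one_eq_counter, residsOf, List.foldl_map]
  rw [hc]
  have hitems := PySem.Dict.items_counter (residsOf A M)
  have hvals : (PySem.Dict.counter (residsOf A M)).values =
      (PySem.Set.ofList (residsOf A M)).map (fun k => (((residsOf A M).count k : Int))) := by
    show ((PySem.Dict.counter (residsOf A M)).items).map (·.2) = _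
    rw [hitems, List.map_map]; rfl
  have hsize : (PySem.Dict.counter (residsOf A M)).size =
      (PySem.Set.ofList (residsOf A M)).length := by
    show ((PySem.Dict.counter (residsOf A M)).items).length = _
    rw [hitems, List.length_map]
  have hbest : (if (PySem.Dict.counter (residsOf A M)).size = 0 then 0
      else (PySem.List.max? (PySem.Dict.counter (residsOf A M)).values (fun v => v)).getD 0)
      = bestOf A M := by
    rw [hvals, hsize, bestOf]
    congr 1
    simp [List.length_eq_zero_iff, ofList_eq_nil_iff]
  simp only [hbest]

theorem best_achieved (A : List Int) (M : Int) (h : A ≠ []) :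
    ∃ r ∈ residsOf A M, ((residsOf A M).count r : Int) = bestOf A M := by
  have hR : residsOf A M ≠ [] := by simp [residsOf, h]
  have hvne : ((PySem.Set.ofList (residsOf A M)).map
      (fun k => (((residsOf A M).count k : Int)))) ≠ [] := by
    simp [ofList_eq_nil_iff, hR]
  set V := ((PySem.Set.ofList (residsOf A M)).map
      (fun k => (((residsOf A M).count k : Int)))) with hV
  rcases hmv : PySem.List.max? V (fun v => v) with _ | m
  · exact absurd ((PySem.List.max?_eq_none_iff V _).mp hmv) hvne
  · have hmem := PySem.List.max?_mem hmv
    rcases List.mem_map.mp hmem with ⟨r, hr, hrm⟩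
    refine ⟨r, (PySem.Set.mem_ofList _ _).mp hr, ?_⟩
    rw [bestOf, if_neg hR, ← hV, hmv]
    simpa using hrm

theorem count_le_best (A : List Int) (M : Int) (r : Int) (hr : r ∈ residsOf A M) :
    ((residsOf A M).count r : Int) ≤ bestOf A M := by
  have hR : residsOf A M ≠ [] := List.ne_nil_of_mem hr
  have hvne : ((PySem.Set.ofList (residsOf A M)).map
      (fun k => (((residsOf A M).count k : Int)))) ≠ [] := by
    simp [ofList_eq_nil_iff, hR]
  set V := ((PySem.Set.ofList (residsOf A M)).map
      (fun k => (((residsOf A M).count k : Int)))) with hV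
  rcases hmv : PySem.List.max? V (fun v => v) with _ | m
  · exact absurd ((PySem.List.max?_eq_none_iff V _).mp hmv) hvne
  · have := PySem.List.max?_isMax hmv (((residsOf A M).count r : Int))
      (by rw [hV]; exact List.mem_map.mpr ⟨r, (PySem.Set.mem_ofList _ _).mpr hr, rfl⟩)
    rw [bestOf, if_neg hR, ← hV, hmv]
    simpa using this

theorem best_le_len (A : List Int) (M : Int) : bestOf A M ≤ (A.length : Int) := by
  by_cases h : A = []
  · subst h; simp [bestOf, residsOf]
  · rcases best_achieved A M h with ⟨r, _, hr⟩
    rw [← hr]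
    have := List.count_le_length (l := residsOf A M) (a := r)
    have hlen : (residsOf A M).length = A.length := by simp [residsOf]
    exact_mod_cast hlen ▸ this

theorem scan_spec (result : List (List Int)) (M b : Int)
    (H1 : ∀ res ∈ result, ifMAlign res M = true → ((res.length : Int) ≤ b))
    (H2 : 3 ≤ b → ∃ res ∈ result, ((res.length : Int) = b ∧ ifMAlign res M = true)) :
    ∀ (n : Nat) (k : Int), k ≤ 2 + n → (b ≤ k ∨ b < 3) →
      scanA result M (PySem.List.pyRange k 2 (-1)) = if 3 ≤ b ∧ b ≤ k then b else 1 := by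
  intro n
  induction n with
  | zero =>
    intro k hk hb
    rw [PySem.List.pyRange_neg_one_eq_nil (by omega), scanA]
    rw [if_neg (by omega)]
  | succ n ih =>
    intro k hk hb
    by_cases h2 : k ≤ 2
    · rw [PySem.List.pyRange_neg_one_eq_nil h2, scanA, if_neg (by omega)]
    · rw [PySem.List.pyRange_neg_one_cons (by omega), scanA]
      by_cases hhit : 3 ≤ b ∧ b = k
      · obtain ⟨res, hres, hlen, halig⟩ := H2 hhit.1
        have hfind : (result.find? (fun res => ((res.length : Int) == k) && ifMAlign res M)).isSome := by
          rw [List.find?_isSome]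
          exact ⟨res, hres, by simp [halig, hlen, hhit.2.symm]⟩
        rcases Option.isSome_iff_exists.mp hfind with ⟨v, hv⟩
        rw [hv, if_pos ⟨hhit.1, le_of_eq hhit.2⟩, hhit.2]
      · have hfind : result.find? (fun res => ((res.length : Int) == k) && ifMAlign res M) = none := by
          rw [List.find?_eq_none]
          intro res hres
          by_contra hcon
          simp only [Bool.and_eq_true, beq_iff_eq] at hcon
          have := H1 res hres hcon.2
          rw [hcon.1] at this
          rcases hb with hb | hb
          · exact hhit ⟨by omega, by omega⟩
          · omega
        rw [hfind]
        have hbk : b ≤ k - 1 ∨ b < 3 := by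
          rcases hb with hb | hb
          · rcases eq_or_lt_of_le hb with he | hl
            · by_cases h3 : 3 ≤ b
              · exact absurd ⟨h3, he⟩ hhit
              · right; omega
            · left; omega
          · right; exact hb
        rw [ih (k - 1) (by omega) hbk]
        by_cases hc : 3 ≤ b ∧ b ≤ k
        · have : b ≤ k - 1 := by
            rcases eq_or_lt_of_le hc.2 with he | hl
            · exact absurd ⟨hc.1, he⟩ hhit
            · omega
          rw [if_pos ⟨hc.1, this⟩, if_pos hc]
        · rw [if_neg (by intro hcc; exact hc ⟨hcc.1, by omega⟩), if_neg hc]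

theorem countP_resid (A As : List Int) (M r : Int) (hperm : As.Perm A) :
    As.countP (fun y => PySem.Int.mod y M == r) = (residsOf A M).count r := by
  rw [hperm.countP_eq, residsOf, List.count, List.countP_map]
  rfl

theorem solution_eq (A : List Int) (M : Int) (hM1 : M ≠ 1) (hM0 : M ≠ 0) :
    solution A M = solution_alt A M := by
  rw [alt_eq_best]
  unfold solution
  rw [if_neg hM1]
  set As := PySem.List.sorted A (fun x => x) false with hAs
  have hperm : As.Perm A := PySem.List.sorted_perm A _ _
  have hlen : As.length = A.length := hperm.length_eq
  have hres : btA As 0 0 [] [] = gen none As [] := by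
    rw [btA_eq_gen As As.length 0 0 [] [] (by omega) (le_refl 0)]
    simp
  show scanA (btA As 0 0 [] []) M (PySem.List.pyRange (As.length : Int) 2 (-1)) = _
  rw [hres]
  have H1 : ∀ res ∈ gen none As [], ifMAlign res M = true →
      ((res.length : Int) ≤ bestOf A M) := by
    intro res hmem halig
    obtain ⟨s, hsub, hne, hre⟩ := gen_sound As none [] res hmem
    simp only [List.nil_append] at hre
    subst hre
    obtain ⟨hd, tl, rfl⟩ := List.exists_cons_of_ne_nil hne
    set r := PySem.Int.mod hd M with hr
    have hall : ∀ y ∈ hd :: tl, PySem.Int.mod y M = r := by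
      intro y hy
      obtain ⟨j, hj, rfl⟩ := List.mem_iff_getElem.mp hy
      rcases Nat.eq_zero_or_pos j with h0 | hpos
      · subst h0; rfl
      · have := (ifMAlign_iff _ M).mp halig 0 j hpos hj
        have hdvd := (PySem.Int.mod_eq_zero_iff_dvd _ _).mp this
        have := (mod_eq_mod_iff_dvd_sub M _ _ hM0).mpr hdvd
        simpa using this.symm
    have hcnt : (hd :: tl).countP (fun y => PySem.Int.mod y M == r) = (hd :: tl).length :=
      (List.countP_eq_length).mpr (by intro a ha; simpa using hall a ha)
    have hle : (hd :: tl).countP (fun y => PySem.Int.mod y M == r)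
        ≤ As.countP (fun y => PySem.Int.mod y M == r) := hsub.countP_le
    have hrR : r ∈ residsOf A M := by
      have : hd ∈ A := hperm.mem_iff.mp (hsub.mem (by simp))
      exact List.mem_map.mpr ⟨hd, this, rfl⟩
    have := count_le_best A M r hrR
    rw [countP_resid A As M r hperm] at hle
    calc ((hd :: tl).length : Int)
        = ((hd :: tl).countP (fun y => PySem.Int.mod y M == r) : Int) := by exact_mod_cast hcnt.symm
      _ ≤ ((residsOf A M).count r : Int) := by exact_mod_cast hle
      _ ≤ bestOf A M := this
  have H2 : 3 ≤ bestOf A M → ∃ res ∈ gen none As [],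
      ((res.length : Int) = bestOf A M ∧ ifMAlign res M = true) := by
    intro hb3
    have hA : A ≠ [] := by
      intro h0
      rw [h0] at hb3
      simp [bestOf, residsOf] at hb3
    obtain ⟨r, hrR, hcount⟩ := best_achieved A M hA
    set F := As.filter (fun y => PySem.Int.mod y M == r) with hF
    have hFlen : (F.length : Int) = bestOf A M := by
      rw [hF, ← List.countP_eq_length_filter, countP_resid A As M r hperm, hcount]
    have hFne : F ≠ [] := by
      intro h0
      rw [h0] at hFlen
      simp at hFlen
      omega
    have hFmem : F ∈ gen none As [] := by
      have := gen_complete M r As none [] (hF ▸ hFne) (by intro v hv; cases hv)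
      simpa [hF] using this
    refine ⟨F, hFmem, hFlen, ?_⟩
    rw [ifMAlign_iff]
    intro i j hij hj
    have hi' : F[i]'(by omega) ∈ F := List.getElem_mem _
    have hj' : F[j] ∈ F := List.getElem_mem _
    have hri : PySem.Int.mod (F[i]'(by omega)) M = r := by
      have hi2 : F[i]'(by omega) ∈ As.filter (fun y => PySem.Int.mod y M == r) := by
        rw [← hF]; exact hi'
      simpa using List.of_mem_filter hi2
    have hrj : PySem.Int.mod (F[j]) M = r := by
      have hj2 : F[j] ∈ As.filter (fun y => PySem.Int.mod y M == r) := by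
        rw [← hF]; exact hj'
      simpa using List.of_mem_filter hj2
    rw [PySem.Int.mod_eq_zero_iff_dvd]
    exact (mod_eq_mod_iff_dvd_sub M _ _ hM0).mp (hri.trans hrj.symm)
  rw [scan_spec (gen none As []) M (bestOf A M) H1 H2 A.length (As.length : Int)
      (by omega) (Or.inl (hlen ▸ best_le_len A M))]
  have hble := best_le_len A M
  rw [hlen]
  by_cases hc : 3 ≤ bestOf A M
  · rw [if_pos ⟨hc, hble⟩, if_pos hc]
  · rw [if_neg (by tauto), if_neg hc]

-- ===== VERDICT (by name: the statement is the Claim_ definition above) =====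
theorem solution_spec : Claim_equal_solution := by
  intro A M _ hpre
  exact solution_eq A M hpre.1 hpre.2
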